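-- pv_equiv track=rewrite | github.com/andresgr96/MinionsLLM | tests/syntax/grammar_parser_v3.py | _generate_flattened_shapes_from_combination
-- ===== SOURCE A (Python) =====
-- def _generate_flattened_shapes_from_combination(combination):
--     """
--     Helper to generate shapes from a single combination rule by handling AND/OR logic.
--     It computes the Cartesian product of choices at each position in the rule.
--
--     Args:
--         combination: A list of positions, where each position is a list of choices (OR),
--                      and each choice is a list of nodes (AND).
--                      e.g., [[['A'],['B']], [['C', 'D']]] -> (A or B) then (C and D)
--
--     Returns:
--         A list of flattened shapes, e.g., [['A', 'C', 'D'], ['B', 'C', 'D']]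
--     """
--     import itertools
--
--     # Get the Cartesian product of choices at each position.
--     all_choice_paths = list(itertools.product(*combination))
--
--     all_flattened_shapes = []
--     for path in all_choice_paths:
--         # path is a tuple of choices, e.g., (['A'], ['C', 'D'])
--         flattened_shape = []
--         for choice in path:
--             # choice is a list of nodes to be ANDed, e.g., ['C', 'D']
--             flattened_shape.extend(choice)
--
--         if flattened_shape not in all_flattened_shapes:
--             all_flattened_shapes.append(flattened_shape)
--
--     return all_flattened_shapes
-- ===== SOURCE B (Python) =====
-- def _generate_flattened_shapes_from_combination(combination):
--     # Recursive DFS that yields fully flattened shapes directly (as tuples),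
--     # then dedups preserving first-occurrence order via dict.fromkeys.
--     def rec(i):
--         if i == len(combination):
--             yield ()
--             return
--         for choice in combination[i]:
--             for tail in rec(i + 1):
--                 yield tuple(choice) + tail
--     return [list(t) for t in dict.fromkeys(rec(0))]
-- ===== Notes on version B (the rewrite author's own statement) =====
-- stated objective: alternative
-- what changed: B replaces the itertools.product pass plus per-path extend-flatten loop plus quadratic 'not in' scan with a recursive depth-first generator that yields each fully flattened shape directly as a tuple, deduplicated in one dict.fromkeys call.
import Mathlib
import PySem

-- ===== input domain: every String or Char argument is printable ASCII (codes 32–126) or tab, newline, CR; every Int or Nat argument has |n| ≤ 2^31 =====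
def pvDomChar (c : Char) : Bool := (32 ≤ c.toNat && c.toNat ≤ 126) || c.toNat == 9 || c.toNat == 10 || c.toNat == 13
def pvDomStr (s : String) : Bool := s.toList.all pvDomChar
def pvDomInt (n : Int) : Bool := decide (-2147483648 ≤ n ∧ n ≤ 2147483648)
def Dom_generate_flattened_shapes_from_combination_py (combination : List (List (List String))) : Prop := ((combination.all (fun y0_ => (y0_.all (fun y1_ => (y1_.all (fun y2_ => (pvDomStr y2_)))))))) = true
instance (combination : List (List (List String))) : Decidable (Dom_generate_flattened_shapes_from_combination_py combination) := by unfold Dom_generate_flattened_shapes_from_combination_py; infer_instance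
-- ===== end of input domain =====

-- B replaces product-then-flatten-then-membership-scan with a recursive DFS emitting
-- flattened shapes directly, deduplicated by dict.fromkeys; return value only.

-- ===== PORT A =====
-- itertools.product(*combination): leftmost position varies slowest
def pyProduct (xss : List (List (List String))) : List (List (List String)) :=
  match xss with
  | [] => [[]]
  | x :: rest => x.flatMap (fun c => (pyProduct rest).map (fun p => c :: p))

def generate_flattened_shapes_from_combination_py (combination : List (List (List String))) : List (List String) :=
  let all_choice_paths := pyProduct combination
  all_choice_paths.foldl (fun all_flattened_shapes path =>
    let flattened_shape := path.foldl (fun fs choice => fs ++ choice) []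
    if all_flattened_shapes.contains flattened_shape then all_flattened_shapes
    else all_flattened_shapes ++ [flattened_shape]) []

-- ===== PORT B =====
-- rec(i): recursion over the remaining positions, yielding flattened tails
def bShapesRec (rest : List (List (List String))) : List (List String) :=
  match rest with
  | [] => [[]]
  | pos :: rest' => pos.flatMap (fun choice => (bShapesRec rest').map (fun tail => choice ++ tail))

def generate_flattened_shapes_from_combination_py_alt (combination : List (List (List String))) : List (List String) :=
  PySem.List.dedup (bShapesRec combination)  -- dict.fromkeys

-- ===== PRECONDITION & SPEC =====
def Spec_generate_flattened_shapes_from_combination_py (combination : List (List (List String))) (out : List (List String)) : Prop := out = generate_flattened_shapes_from_combination_py_alt combination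
instance (combination : List (List (List String))) (out : List (List String)) : Decidable (Spec_generate_flattened_shapes_from_combination_py combination out) := by unfold Spec_generate_flattened_shapes_from_combination_py; infer_instance

-- ===== CLAIM (what is proved, stated in full; the proofs are below) =====
def Claim_equal_generate_flattened_shapes_from_combination_py : Prop := ∀ (combination : List (List (List String))), Dom_generate_flattened_shapes_from_combination_py combination → Spec_generate_flattened_shapes_from_combination_py combination (generate_flattened_shapes_from_combination_py combination)

-- ===== LEMMAS AND PROOFS =====

theorem foldl_append_eq (path : List (List String)) (a : List String) :
    path.foldl (fun fs choice => fs ++ choice) a = a ++ path.flatten := by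
  induction path generalizing a with
  | nil => simp
  | cons c rest ih => simp [ih, List.append_assoc]

theorem map_flatten_pyProduct (xss : List (List (List String))) :
    (pyProduct xss).map List.flatten = bShapesRec xss := by
  induction xss with
  | nil => simp [pyProduct, bShapesRec]
  | cons x rest ih =>
      simp [pyProduct, bShapesRec, ← ih, List.map_flatMap, Function.comp_def]

-- ===== VERDICT (by name: the statement is the Claim_ definition above) =====
theorem generate_flattened_shapes_from_combination_py_spec : Claim_equal_generate_flattened_shapes_from_combination_py := by
  intro combination _
  unfold Spec_generate_flattened_shapes_from_combination_py
  unfold generate_flattened_shapes_from_combination_py generate_flattened_shapes_from_combination_py_alt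
  simp only [foldl_append_eq, List.nil_append]
  rw [← List.foldl_map (f := List.flatten)
        (g := fun (acc : List (List String)) s => if acc.contains s then acc else acc ++ [s]),
    map_flatten_pyProduct, PySem.List.dedup_eq_ofList, PySem.Set.ofList_eq_foldl]
  rfl
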